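-- pv_equiv track=rewrite | github.com/saannsaar/Algoritmeja | getsum.py | count
-- ===== SOURCE A (Python) =====
-- from itertools import combinations
--
-- def count(n, k, x):
--
--     if n == 1:
--         return n
--     createList = list(range(1, n +1))
--
--
--     l = 0
--     # Ei paras mahdollinen toteutus jos käsiteltävänä isoja lukuja
--     for combination in combinations(createList, k):
--         if sum(combination) == x:
--             l = l + 1
--     return l
-- ===== SOURCE B (Python) =====
-- def count(n, k, x):
--     nn = n if n > 0 else 0
--     if k < 0 or k > nn or x < 0 or x > nn * (nn + 1) // 2:
--         return 0
--     dp = [[1 if j == 0 and s == 0 else 0 for s in range(x + 1)]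
--           for j in range(k + 1)]
--     for i in range(1, nn + 1):
--         dp = [[dp[j][s] + (dp[j - 1][s - i] if j >= 1 and s >= i else 0)
--                for s in range(x + 1)] for j in range(k + 1)]
--     return dp[k][x]
-- ===== Notes on version B (the rewrite author's own statement) =====
-- stated objective: faster
-- what changed: Replaces enumeration of all C(n,k) k-combinations of {1..n} with a size-by-sum dynamic program over the x+1 reachable sums, plus range guards, and drops A's unconditional n==1 shortcut.
-- intended difference: For n == 1 A returns 1 unconditionally (its n==1 shortcut ignores k and x), while B returns the real number of k-subsets of {1} summing to x, which is 0 except at (k,x) = (0,0) or (1,1); B's value is the intended count. — e.g. on count(1, 1, 3): A returns 1, B returns 0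
import Mathlib
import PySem

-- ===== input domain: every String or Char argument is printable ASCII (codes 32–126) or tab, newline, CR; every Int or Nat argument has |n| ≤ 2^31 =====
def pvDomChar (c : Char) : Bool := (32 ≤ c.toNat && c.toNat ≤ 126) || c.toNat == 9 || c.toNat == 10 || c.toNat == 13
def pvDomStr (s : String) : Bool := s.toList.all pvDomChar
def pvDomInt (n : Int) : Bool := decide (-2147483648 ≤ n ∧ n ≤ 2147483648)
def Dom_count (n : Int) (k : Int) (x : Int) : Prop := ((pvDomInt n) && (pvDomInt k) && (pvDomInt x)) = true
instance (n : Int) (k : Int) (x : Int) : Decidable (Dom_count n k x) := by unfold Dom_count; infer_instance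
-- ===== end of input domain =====

-- B replaces A's enumeration of all C(n,k) combinations with a size-by-sum dynamic program
-- (faster; A's unconditional n==1 shortcut is an intended difference, see D_count below).

-- ===== PORT A =====
-- itertools.combinations(l, k), as lists, in CPython's lexicographic order (we only count
-- matches, so order is irrelevant); like itertools it returns [] immediately when k > len(l).
-- Recursion on k (not on l) so that evaluation does not recurse 'len(l)' deep.
def pyCombos : List Int → Nat → List (List Int)
  | _, 0 => [[]]
  | l, r + 1 =>
    if l.length < r + 1 then []
    else
      l.tails.flatMap (fun t =>
        match t with
        | [] => []
        | a :: as => (pyCombos as r).map (fun c => a :: c))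

def count (n : Int) (k : Int) (x : Int) : Int :=
  if n = 1 then n
  else
    -- list(range(1, n+1)); equals PySem.List.pyRange 1 (n+1) 1 (PySem.List.pyRange_one), in a form that evaluates fast
    let createList := (List.range n.toNat).map (fun (j : Nat) => 1 + (j : Int))
    -- A raises ValueError for k < 0 (excluded by Pre_count); k.toNat is only read for 0 ≤ k
    (pyCombos createList k.toNat).foldl (fun l c => if c.sum = x then l + 1 else l) 0

-- ===== PORT B =====
def dpGet (dp : List (List Int)) (j s : Nat) : Int := (dp.getD j []).getD s 0

def dpInit (K X : Nat) : List (List Int) :=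
  (List.range (K + 1)).map fun j => (List.range (X + 1)).map fun s =>
    if j = 0 ∧ s = 0 then (1 : Int) else 0

def dpStep (K X : Nat) (dp : List (List Int)) (i : Nat) : List (List Int) :=
  (List.range (K + 1)).map fun j => (List.range (X + 1)).map fun s =>
    dpGet dp j s + (if 1 ≤ j ∧ i ≤ s then dpGet dp (j - 1) (s - i) else 0)

def count_alt (n : Int) (k : Int) (x : Int) : Int :=
  let nn : Nat := n.toNat
  if k < 0 ∨ (nn : Int) < k ∨ x < 0 ∨ ((nn * (nn + 1) / 2 : Nat) : Int) < x then 0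
  else
    let dp := (List.range' 1 nn).foldl (dpStep k.toNat x.toNat) (dpInit k.toNat x.toNat)
    dpGet dp k.toNat x.toNat

-- ===== PRECONDITION & SPEC =====
-- Pre_count excludes exactly the inputs where A raises: k < 0 with n ≠ 1 (ValueError from combinations).
def Pre_count (n : Int) (k : Int) (x : Int) : Prop := n = 1 ∨ 0 ≤ k
instance (n : Int) (k : Int) (x : Int) : Decidable (Pre_count n k x) := by unfold Pre_count; infer_instance
def pvWitness_count : Int × Int × Int := (5, 2, 5)

-- For n == 1 A returns 1 unconditionally (its n==1 shortcut ignores k and x), while B returns the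
-- real number of k-subsets of {1} summing to x (0 except at (k,x)=(0,0) or (1,1)); B's is the intended count.
def D_count (n : Int) (k : Int) (x : Int) : Prop :=
  n = 1 ∧ ¬((k = 0 ∧ x = 0) ∨ (k = 1 ∧ x = 1))
instance (n : Int) (k : Int) (x : Int) : Decidable (D_count n k x) := by unfold D_count; infer_instance

def Spec_count (n : Int) (k : Int) (x : Int) (out : Int) : Prop := ¬ D_count n k x → out = count_alt n k x
instance (n : Int) (k : Int) (x : Int) (out : Int) : Decidable (Spec_count n k x out) := by unfold Spec_count; infer_instance

def pvDiffWitness_count : Int × Int × Int := (1, 1, 3)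
def pvDiffWitnessOut_count : Int × Int := (1, 0)

-- ===== CLAIM (what is proved, stated in full; the proofs are below) =====
def Claim_unchanged_count : Prop := ∀ (n : Int) (k : Int) (x : Int), Dom_count n k x → Pre_count n k x → Spec_count n k x (count n k x)
def Claim_changed_count : Prop := Dom_count (pvDiffWitness_count.1) (pvDiffWitness_count.2.1) (pvDiffWitness_count.2.2) ∧ Pre_count (pvDiffWitness_count.1) (pvDiffWitness_count.2.1) (pvDiffWitness_count.2.2) ∧ D_count (pvDiffWitness_count.1) (pvDiffWitness_count.2.1) (pvDiffWitness_count.2.2) ∧ count (pvDiffWitness_count.1) (pvDiffWitness_count.2.1) (pvDiffWitness_count.2.2) = pvDiffWitnessOut_count.1 ∧ count_alt (pvDiffWitness_count.1) (pvDiffWitness_count.2.1) (pvDiffWitness_count.2.2) = pvDiffWitnessOut_count.2 ∧ pvDiffWitnessOut_count.1 ≠ pvDiffWitnessOut_count.2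
def Claim_exact_count : Prop := ∀ (n : Int) (k : Int) (x : Int), Dom_count n k x → Pre_count n k x → D_count n k x → count n k x ≠ count_alt n k x

-- ===== LEMMAS AND PROOFS =====

-- the mathematical count: number of j-element combinations of l with sum s
def N (l : List Int) (j : Nat) (s : Int) : Int :=
  ((pyCombos l j).countP (fun c => c.sum == s) : Nat)

theorem pyCombos_zero (l : List Int) : pyCombos l 0 = [[]] := rfl

theorem pyCombos_nil (k : Nat) : pyCombos [] (k + 1) = [] := by
  simp [pyCombos]

theorem pyCombos_short (l : List Int) (r : Nat) (h : l.length < r + 1) :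
    pyCombos l (r + 1) = [] := by
  rw [pyCombos, if_pos h]

theorem tails_flatMap_short (as : List Int) (r : Nat) (h : as.length ≤ r) :
    as.tails.flatMap (fun t =>
      match t with
      | [] => ([] : List (List Int))
      | a :: bs => (pyCombos bs r).map (fun c => a :: c)) = [] := by
  induction as with
  | nil => simp
  | cons a as ih =>
    simp only [List.length_cons] at h
    rw [List.tails_cons, List.flatMap_cons, ih (by omega)]
    obtain ⟨r', rfl⟩ : ∃ r', r = r' + 1 := ⟨r - 1, by omega⟩
    simp [pyCombos_short as r' (by omega)]

theorem pyCombos_cons (a : Int) (as : List Int) (k : Nat) :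
    pyCombos (a :: as) (k + 1) =
      (pyCombos as k).map (fun c => a :: c) ++ pyCombos as (k + 1) := by
  rcases Nat.lt_or_ge as.length k with h | h
  · obtain ⟨k', rfl⟩ : ∃ k', k = k' + 1 := ⟨k - 1, by omega⟩
    rw [pyCombos_short (a :: as) (k' + 1) (by simp; omega),
      pyCombos_short as k' (by omega),
      pyCombos_short as (k' + 1) (by omega)]
    simp
  · rw [pyCombos, if_neg (by simp; omega), List.tails_cons, List.flatMap_cons]
    congr 1
    rcases Nat.lt_or_ge as.length (k + 1) with h' | h'
    · rw [tails_flatMap_short as k (by omega), pyCombos_short as k h']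
    · rw [pyCombos, if_neg (by omega)]

theorem N_zero (l : List Int) (s : Int) : N l 0 s = if s = 0 then 1 else 0 := by
  cases l <;>
    · simp only [N, pyCombos_zero, List.countP, List.countP.go, List.sum_nil]
      rcases eq_or_ne s 0 with h | h
      · subst h; simp
      · have hb : ((0:Int) == s) = false := beq_eq_false_iff_ne.mpr (Ne.symm h)
        simp [hb, h]

theorem N_nil (j : Nat) (s : Int) : N [] (j + 1) s = 0 := by
  simp [N, pyCombos_nil]

theorem N_cons (a : Int) (as : List Int) (j : Nat) (s : Int) :
    N (a :: as) (j + 1) s = N as j (s - a) + N as (j + 1) s := by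
  simp only [N, pyCombos_cons, List.countP_append, List.countP_map]
  have h : ∀ c ∈ pyCombos as j, (((fun c : List Int => c.sum == s) ∘ (fun c => a :: c)) c = true ↔
      (fun c : List Int => c.sum == s - a) c = true) := by
    intro c _; simp only [Function.comp, List.sum_cons, beq_iff_eq]; omega
  rw [List.countP_congr h]
  push_cast; ring

theorem N_append_singleton (l : List Int) (a : Int) (j : Nat) (s : Int) :
    N (l ++ [a]) j s = N l j s + (if 1 ≤ j then N l (j - 1) (s - a) else 0) := by
  induction l generalizing j s with
  | nil =>
    cases j with
    | zero => simp [N_zero]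
    | succ j =>
      simp only [List.nil_append]
      cases j with
      | zero => simp [N_cons, N_zero, N_nil]
      | succ j => simp [N_cons, N_nil]
  | cons b l ih =>
    cases j with
    | zero => simp [N_zero]
    | succ j =>
      simp only [List.cons_append, N_cons, ih]
      cases j with
      | zero => simp [N_zero]; ring
      | succ j => simp [N_cons]; rw [show s - b - a = s - a - b by ring]; ring

theorem N_lt (l : List Int) (h : ∀ a ∈ l, 1 ≤ a) (j : Nat) (s : Int) (hs : s < (j : Int)) :
    N l j s = 0 := by
  induction l generalizing j s with
  | nil =>
    cases j with
    | zero => rw [N_zero]; simp at hs ⊢; omega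
    | succ j => exact N_nil j s
  | cons a as ih =>
    have ha : 1 ≤ a := h a (by simp)
    have h' : ∀ b ∈ as, 1 ≤ b := fun b hb => h b (by simp [hb])
    cases j with
    | zero => rw [N_zero]; simp at hs ⊢; omega
    | succ j =>
      rw [N_cons, ih h' j (s - a) (by push_cast at hs ⊢; omega),
        ih h' (j + 1) s hs]
      ring

theorem N_gt (l : List Int) (h : ∀ a ∈ l, 0 ≤ a) (j : Nat) (s : Int) (hs : l.sum < s) :
    N l j s = 0 := by
  induction l generalizing j s with
  | nil =>
    cases j with
    | zero => rw [N_zero]; simp at hs ⊢; omega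
    | succ j => exact N_nil j s
  | cons a as ih =>
    have ha : 0 ≤ a := h a (by simp)
    have h' : ∀ b ∈ as, 0 ≤ b := fun b hb => h b (by simp [hb])
    have hsum : 0 ≤ as.sum := List.sum_nonneg h'
    simp only [List.sum_cons] at hs
    cases j with
    | zero => rw [N_zero]; simp; omega
    | succ j =>
      rw [N_cons, ih h' j (s - a) (by omega), ih h' (j + 1) s (by omega)]
      ring

theorem pyCombos_nil_of_gt (l : List Int) (j : Nat) (h : l.length < j) : pyCombos l j = [] := by
  obtain ⟨j', rfl⟩ : ∃ j', j = j' + 1 := ⟨j - 1, by omega⟩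
  exact pyCombos_short l j' h

-- the ideal DP table for item list L
def T (L : List Int) (K X : Nat) : List (List Int) :=
  (List.range (K + 1)).map fun j => (List.range (X + 1)).map fun (s : Nat) => N L j (s : Int)

theorem dpGet_T (L : List Int) (K X j s : Nat) (hj : j ≤ K) (hs : s ≤ X) :
    dpGet (T L K X) j s = N L j (s : Int) := by
  unfold dpGet T
  rw [PySem.List.getD_map_range _ _ _ _ (by omega),
    PySem.List.getD_map_range _ _ _ _ (by omega)]

theorem dpInit_eq (K X : Nat) : dpInit K X = T [] K X := by
  unfold dpInit T
  congr 1; funext j; congr 1; funext s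
  cases j with
  | zero => rw [N_zero]; rcases Nat.eq_zero_or_pos s with h | h <;> simp [h]
  | succ j => rw [N_nil]; simp

theorem dpStep_T (L : List Int) (K X i : Nat) (hi : 1 ≤ i) (h : ∀ a ∈ L, 1 ≤ a) :
    dpStep K X (T L K X) i = T (L ++ [(i : Int)]) K X := by
  unfold dpStep
  conv_rhs => rw [T]
  apply List.map_congr_left
  intro j hj; rw [List.mem_range] at hj
  apply List.map_congr_left
  intro s hs; rw [List.mem_range] at hs
  rw [dpGet_T L K X j s (by omega) (by omega), N_append_singleton]
  rcases Nat.eq_zero_or_pos j with hj0 | hj0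
  · simp [hj0]
  · rcases Nat.lt_or_ge s i with his | his
    · rw [if_neg (by omega : ¬(1 ≤ j ∧ i ≤ s)), if_pos (by omega : 1 ≤ j),
        N_lt L h (j-1) ((s:Int) - (i:Int)) (by push_cast; omega)]
    · rw [if_pos (⟨by omega, his⟩ : 1 ≤ j ∧ i ≤ s), if_pos (by omega : 1 ≤ j), dpGet_T L K X (j-1) (s-i) (by omega) (by omega)]
      congr 1
      rw [Nat.cast_sub his]

theorem dpFold (K X m : Nat) :
    (List.range' 1 m).foldl (dpStep K X) (dpInit K X) =
      T ((List.range' 1 m).map (fun (i : Nat) => (i : Int))) K X := by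
  induction m with
  | zero => simpa using dpInit_eq K X
  | succ m ih =>
    rw [List.range'_concat, List.foldl_append, ih, List.map_append]
    simp only [List.foldl_cons, List.foldl_nil, List.map_cons, List.map_nil]
    rw [dpStep_T _ _ _ _ (by omega)]
    intro a ha
    simp only [List.mem_map] at ha
    obtain ⟨b, hb, rfl⟩ := ha
    rw [List.mem_range'_1] at hb
    omega

theorem foldl_count_eq_N (l : List Int) (j : Nat) (x : Int) :
    (pyCombos l j).foldl (fun l c => if c.sum = x then l + 1 else l) 0 = N l j x := by
  rw [show (fun (l : Int) (c : List Int) => if c.sum = x then l + 1 else l)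
      = (fun acc c => if (fun c : List Int => c.sum == x) c = true then acc + 1 else acc) from by
    funext l c; simp]
  rw [PySem.List.foldl_count_if]
  simp [N]

theorem createList_eq (n : Int) :
    (List.range n.toNat).map (fun (j : Nat) => 1 + (j : Int)) =
      (List.range' 1 n.toNat).map (fun (i : Nat) => (i : Int)) := by
  rw [List.range'_eq_map_range, List.map_map]
  apply List.map_congr_left
  intro k _
  simp [Function.comp]

theorem sum_range'_nat (m : Nat) : 2 * (List.range' 1 m).sum = m * (m + 1) := by
  induction m with
  | zero => simp
  | succ m ih =>
    rw [List.range'_concat, List.sum_append, Nat.mul_add, ih]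
    simp only [List.sum_cons, List.sum_nil]
    ring

theorem sum_range'_int (m : Nat) :
    ((List.range' 1 m).map (fun (i : Nat) => (i : Int))).sum = ((m * (m + 1) / 2 : Nat) : Int) := by
  have h := sum_range'_nat m
  have : (List.range' 1 m).sum = m * (m + 1) / 2 := by omega
  rw [← this]
  exact (Nat.cast_list_sum (R := Int) _).symm

theorem memL_one (nn : Nat) : ∀ a ∈ (List.range' 1 nn).map (fun (i : Nat) => (i : Int)), 1 ≤ a := by
  intro a ha
  simp only [List.mem_map] at ha
  obtain ⟨b, hb, rfl⟩ := ha
  rw [List.mem_range'_1] at hb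
  omega

theorem count_alt_one (k x : Int) (hne : ¬((k = 0 ∧ x = 0) ∨ (k = 1 ∧ x = 1))) :
    count_alt 1 k x = 0 := by
  by_cases h0 : k < 0 ∨ 1 < k ∨ x < 0 ∨ 1 < x
  · have hc : k < 0 ∨ ((Int.toNat 1 : Nat) : Int) < k ∨ x < 0 ∨
        ((Int.toNat 1 * (Int.toNat 1 + 1) / 2 : Nat) : Int) < x := by norm_num; omega
    unfold count_alt
    rw [if_pos hc]
  · push_neg at h0
    obtain ⟨h1, h2, h3, h4⟩ := h0
    have hk : k = 0 ∨ k = 1 := by omega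
    have hx : x = 0 ∨ x = 1 := by omega
    rcases hk with rfl | rfl <;> rcases hx with rfl | rfl
    · exact absurd (Or.inl ⟨rfl, rfl⟩) hne
    · decide
    · decide
    · exact absurd (Or.inr ⟨rfl, rfl⟩) hne

theorem count_eq_N (n k x : Int) (hn : n ≠ 1) :
    count n k x = N ((List.range' 1 n.toNat).map (fun (i : Nat) => (i : Int))) k.toNat x := by
  unfold count
  rw [if_neg hn]
  rw [createList_eq, foldl_count_eq_N]

-- ===== VERDICT (by name: the statement is the Claim_ definition above) =====
theorem count_spec : Claim_unchanged_count := by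
  intro n k x _ hpre
  unfold Spec_count
  intro hnd
  by_cases hn : n = 1
  · subst hn
    have hcase : (k = 0 ∧ x = 0) ∨ (k = 1 ∧ x = 1) := by
      by_contra hc
      exact hnd ⟨rfl, hc⟩
    rcases hcase with ⟨rfl, rfl⟩ | ⟨rfl, rfl⟩ <;> decide
  · have hk : 0 ≤ k := hpre.resolve_left hn
    rw [count_eq_N n k x hn]
    set nn := n.toNat with hnn
    set L := (List.range' 1 nn).map (fun (i : Nat) => (i : Int)) with hL
    have hlen : L.length = nn := by simp [hL]
    unfold count_alt
    by_cases hg : k < 0 ∨ (n.toNat : Int) < k ∨ x < 0 ∨ ((n.toNat * (n.toNat + 1) / 2 : Nat) : Int) < x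
    · rw [if_pos hg]
      rcases hg with h | h | h | h
      · omega
      · have : pyCombos L k.toNat = [] := pyCombos_nil_of_gt L k.toNat (by omega)
        simp [N, this]
      · exact N_lt L (memL_one nn) k.toNat x (by omega)
      · apply N_gt L (fun a ha => le_trans (by omega) (memL_one nn a ha)) k.toNat x
        rw [hL, sum_range'_int]
        omega
    · rw [if_neg hg]
      push_neg at hg
      obtain ⟨h1, h2, h3, h4⟩ := hg
      rw [dpFold, dpGet_T _ _ _ _ _ le_rfl le_rfl]
      congr 1
      omega

theorem count_changed : Claim_changed_count := by unfold Claim_changed_count; decide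

theorem count_tight : Claim_exact_count := by
  intro n k x _ _ hd
  obtain ⟨rfl, hne⟩ := hd
  have hA : count 1 k x = 1 := by unfold count; simp
  rw [hA, count_alt_one k x hne]
  decide
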